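-- pv_equiv track=rewrite | github.com/mustafaansarii/dp | Questions/Matrix/beutiful matrix 1.py | isBeauty
-- ===== SOURCE A (Python) =====
-- def isBeauty(mat):
--     m = len(mat)
--     n = len(mat[0])
--
--     for col in range(n):
--         total_sum = 0
--         for row in range(m):
--             total_sum += mat[row][col]
--
--         found_beautiful = False
--         for row in range(m):
--             if mat[row][col] == total_sum - mat[row][col]:
--                 found_beautiful = True
--                 break
--
--         if not found_beautiful:
--             return False
--
--     return True
-- ===== SOURCE B (Python) =====
-- def isBeauty(mat):
--     n = len(mat[0])
--     sums = [0] * n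
--     for row in mat:
--         sums = [s + row[c] for c, s in enumerate(sums)]
--     beautiful = [False] * n
--     for row in mat:
--         beautiful = [b or 2 * row[c] == sums[c] for c, b in enumerate(beautiful)]
--     return all(beautiful)
-- ===== Notes on version B (the rewrite author's own statement) =====
-- stated objective: alternative
-- what changed: A scans column-by-column (three nested index loops with early return) while B makes two row-major passes over the rows themselves, first folding a sums-per-column list and then folding a beautiful-per-column boolean list, returning all(beautiful).
-- outside the precondition, e.g. on isBeauty([[1, 2], [3]]): A returns False, B raises IndexError
import Mathlib
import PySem

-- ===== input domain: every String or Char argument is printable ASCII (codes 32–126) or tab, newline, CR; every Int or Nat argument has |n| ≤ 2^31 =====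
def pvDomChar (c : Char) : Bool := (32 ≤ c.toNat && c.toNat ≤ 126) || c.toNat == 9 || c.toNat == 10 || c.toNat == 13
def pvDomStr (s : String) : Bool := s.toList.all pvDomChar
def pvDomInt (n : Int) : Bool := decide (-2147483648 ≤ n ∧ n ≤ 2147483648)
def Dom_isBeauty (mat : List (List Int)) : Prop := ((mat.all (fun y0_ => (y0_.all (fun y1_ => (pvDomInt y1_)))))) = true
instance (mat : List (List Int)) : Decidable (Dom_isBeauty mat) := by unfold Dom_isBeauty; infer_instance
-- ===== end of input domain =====

-- B replaces A's column-by-column scan (with early return) by two row-major passes building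
-- a per-column sums list and then a per-column boolean list; same O(m*n) cost (objective: alternative).

-- ===== PORT A =====
-- inner 'for row in range(m): if mat[row][col] == total_sum - mat[row][col]: found = True; break'
def aFoundLoop (mat : List (List Int)) (col total : Int) : List Int → Bool
  | [] => false
  | row :: rest =>
      if PySem.List.pyGetD (PySem.List.pyGetD mat row []) col 0
          = total - PySem.List.pyGetD (PySem.List.pyGetD mat row []) col 0
      then true
      else aFoundLoop mat col total rest

-- outer 'for col in range(n)' with the early 'return False'
def aColLoop (mat : List (List Int)) (m : Int) : List Int → Bool
  | [] => true
  | col :: rest =>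
      let total : Int :=
        (PySem.List.pyRange 0 m 1).foldl
          (fun s row => s + PySem.List.pyGetD (PySem.List.pyGetD mat row []) col 0) 0
      if aFoundLoop mat col total (PySem.List.pyRange 0 m 1)
      then aColLoop mat m rest
      else false

def isBeauty (mat : List (List Int)) : Bool :=
  let m : Int := (mat.length : Int)
  let n : Int := ((PySem.List.pyGetD mat 0 []).length : Int)
  aColLoop mat m (PySem.List.pyRange 0 n 1)

-- ===== PORT B =====
def isBeauty_alt (mat : List (List Int)) : Bool :=
  let n : Nat := (PySem.List.pyGetD mat 0 []).length
  let sums : List Int :=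
    mat.foldl
      (fun sums row =>
        (PySem.List.enumerate sums 0).map (fun cs => cs.2 + PySem.List.pyGetD row cs.1 0))
      (List.replicate n 0)
  let beautiful : List Bool :=
    mat.foldl
      (fun bs row =>
        (PySem.List.enumerate bs 0).map
          (fun cb => cb.2 || decide (2 * PySem.List.pyGetD row cb.1 0 = PySem.List.pyGetD sums cb.1 0)))
      (List.replicate n false)
  beautiful.all (fun b => b)

-- ===== PRECONDITION & SPEC =====
-- Pre_ excludes inputs where Python raises IndexError: the empty matrix (mat[0]) and ragged
-- matrices with a row shorter than row 0 (both programs index rows at columns < len(mat[0]);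
-- on some such ragged inputs A happens to return False before reaching the short row while B raises).
def Pre_isBeauty (mat : List (List Int)) : Prop :=
  mat ≠ [] ∧ ∀ r ∈ mat, (mat.headD []).length ≤ r.length
instance (mat : List (List Int)) : Decidable (Pre_isBeauty mat) := by unfold Pre_isBeauty; infer_instance

def pvWitness_isBeauty : List (List Int) := [[1, 1], [0, 2]]

def Spec_isBeauty (mat : List (List Int)) (out : Bool) : Prop := out = isBeauty_alt mat
instance (mat : List (List Int)) (out : Bool) : Decidable (Spec_isBeauty mat out) := by unfold Spec_isBeauty; infer_instance

-- ===== CLAIM (what is proved, stated in full; the proofs are below) =====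
def Claim_equal_isBeauty : Prop := ∀ (mat : List (List Int)), Dom_isBeauty mat → Pre_isBeauty mat → Spec_isBeauty mat (isBeauty mat)

-- ===== LEMMAS AND PROOFS =====

-- the column sum both programs compute for column c
def colS (mat : List (List Int)) (c : Int) : Int :=
  (mat.map (fun r => PySem.List.pyGetD r c 0)).sum

theorem aFoundLoop_eq_any (mat : List (List Int)) (col total : Int) (l : List Int) :
    aFoundLoop mat col total l
      = l.any (fun row =>
          decide (PySem.List.pyGetD (PySem.List.pyGetD mat row []) col 0
            = total - PySem.List.pyGetD (PySem.List.pyGetD mat row []) col 0)) := by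
  induction l with
  | nil => rfl
  | cons r rest ih => simp [aFoundLoop, ih]

theorem total_eq (mat : List (List Int)) (c : Int) :
    ((PySem.List.pyRange 0 (mat.length : Int) 1).foldl
        (fun s row => s + PySem.List.pyGetD (PySem.List.pyGetD mat row []) c 0) 0)
      = colS mat c := by
  rw [PySem.List.foldl_pyRange_zero_pyGetD' mat [] (fun s r => s + PySem.List.pyGetD r c 0) 0]
  rw [PySem.List.foldl_add]
  simp [colS]

theorem found_eq (mat : List (List Int)) (c t : Int) :
    aFoundLoop mat c t (PySem.List.pyRange 0 (mat.length : Int) 1)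
      = mat.any (fun r =>
          decide (PySem.List.pyGetD r c 0 = t - PySem.List.pyGetD r c 0)) := by
  rw [aFoundLoop_eq_any]
  have h := PySem.List.map_pyGetD_pyRange_zero' mat []
  calc (PySem.List.pyRange 0 (mat.length : Int) 1).any (fun row =>
          decide (PySem.List.pyGetD (PySem.List.pyGetD mat row []) c 0
            = t - PySem.List.pyGetD (PySem.List.pyGetD mat row []) c 0))
      = ((PySem.List.pyRange 0 (mat.length : Int) 1).map (fun j => PySem.List.pyGetD mat j [])).any
          (fun r => decide (PySem.List.pyGetD r c 0 = t - PySem.List.pyGetD r c 0)) := by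
        rw [List.any_map]; rfl
    _ = _ := by rw [h]

theorem aColLoop_eq_all (mat : List (List Int)) (l : List Int) :
    aColLoop mat (mat.length : Int) l
      = l.all (fun col =>
          mat.any (fun r =>
            decide (PySem.List.pyGetD r col 0 = colS mat col - PySem.List.pyGetD r col 0))) := by
  induction l with
  | nil => rfl
  | cons c rest ih =>
      simp only [aColLoop, total_eq, found_eq, ih, List.all_cons]
      split_ifs with h <;> simp [h]

-- getElem? of enumerate
theorem enum_getElem? {α : Type} (l : List α) (s : Int) (k : Nat) :
    (PySem.List.enumerate l s)[k]? = l[k]?.map (fun x => (s + (k : Int), x)) := by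
  induction l generalizing s k with
  | nil => simp [PySem.List.enumerate]
  | cons x xs ih =>
      cases k with
      | zero => simp [PySem.List.enumerate_cons]
      | succ k =>
          simp only [PySem.List.enumerate_cons, List.getElem?_cons_succ, ih (s+1) k]
          cases xs[k]? with
          | none => rfl
          | some v => simp only [Option.map_some]; congr 2; push_cast; ring

-- the sums fold of B, elementwise
theorem sums_getElem? (rows : List (List Int)) (acc : List Int) (k : Nat) :
    (rows.foldl
        (fun sums row =>
          (PySem.List.enumerate sums 0).map (fun cs => cs.2 + PySem.List.pyGetD row cs.1 0)) acc)[k]?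
      = acc[k]?.map (fun v => v + colS rows (k : Int)) := by
  induction rows generalizing acc with
  | nil => simp [colS]
  | cons row rows ih =>
      rw [List.foldl_cons, ih]
      rw [List.getElem?_map, enum_getElem?]
      cases acc[k]? with
      | none => simp
      | some v => simp [colS]; ring

-- the beautiful fold of B, elementwise (q is the fixed sums list)
theorem beaut_getElem? (q : List Int) (rows : List (List Int)) (acc : List Bool) (k : Nat) :
    (rows.foldl
        (fun bs row =>
          (PySem.List.enumerate bs 0).map
            (fun cb => cb.2 || decide (2 * PySem.List.pyGetD row cb.1 0 = PySem.List.pyGetD q cb.1 0))) acc)[k]?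
      = acc[k]?.map (fun b => b || rows.any (fun row =>
          decide (2 * PySem.List.pyGetD row (k : Int) 0 = PySem.List.pyGetD q (k : Int) 0))) := by
  induction rows generalizing acc with
  | nil => simp
  | cons row rows ih =>
      rw [List.foldl_cons, ih]
      rw [List.getElem?_map, enum_getElem?]
      cases acc[k]? <;> simp [Bool.or_assoc]

-- ===== VERDICT (by name: the statement is the Claim_ definition above) =====
theorem isBeauty_spec : Claim_equal_isBeauty := by
  intro mat _ _
  unfold Spec_isBeauty isBeauty isBeauty_alt
  simp only []
  set n : Nat := (PySem.List.pyGetD mat 0 []).length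
  set sums : List Int :=
    mat.foldl
      (fun sums row =>
        (PySem.List.enumerate sums 0).map (fun cs => cs.2 + PySem.List.pyGetD row cs.1 0))
      (List.replicate n 0) with hsums
  -- the sums list holds exactly the column sums
  have hS : ∀ k : Nat, k < n → PySem.List.pyGetD sums (k : Int) 0 = colS mat (k : Int) := by
    intro k hk
    have h1 : sums[k]? = some (0 + colS mat (k : Int)) := by
      rw [hsums, sums_getElem?]
      simp [hk]
    rw [PySem.List.pyGetD_natCast]
    simp [List.getD, h1]
  -- B's beautiful list, characterised
  have hB : mat.foldl
      (fun bs row =>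
        (PySem.List.enumerate bs 0).map
          (fun cb => cb.2 || decide (2 * PySem.List.pyGetD row cb.1 0 = PySem.List.pyGetD sums cb.1 0)))
      (List.replicate n false)
      = (List.range n).map (fun (k : Nat) => mat.any (fun row =>
          decide (2 * PySem.List.pyGetD row ((k : Int)) 0 = PySem.List.pyGetD sums ((k : Int)) 0))) := by
    apply List.ext_getElem?
    intro k
    rw [beaut_getElem?]
    by_cases hk : k < n
    · have hr : (List.range n)[k]? = some k := by simp [hk]
      simp only [List.getElem?_map, hr, List.getElem?_replicate, if_pos hk,
        Option.map_some, Bool.false_or]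
    · have hr : (List.range n)[k]? = none := by simp [Nat.not_lt.mp hk]
      simp only [List.getElem?_map, hr, List.getElem?_replicate, if_neg hk, Option.map_none]
  rw [hB, List.all_map]
  -- A's side, characterised
  rw [aColLoop_eq_all, PySem.List.pyRange_one, List.all_map]
  simp only [Int.sub_zero, Int.toNat_natCast, zero_add]
  -- compare the two per-column predicates over the columns of range n
  rw [Bool.eq_iff_iff]
  simp only [Function.comp, List.all_eq_true, List.mem_range, List.any_eq_true,
    decide_eq_true_eq]
  constructor
  · intro h k hk
    obtain ⟨r, hr, hP⟩ := h k hk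
    refine ⟨r, hr, ?_⟩
    rw [hS k hk]
    omega
  · intro h k hk
    obtain ⟨r, hr, hP⟩ := h k hk
    refine ⟨r, hr, ?_⟩
    rw [hS k hk] at hP
    omega
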